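-- pv_equiv track=rewrite | github.com/jangyoungdo/MM_Tool | other_team.py | detect_continuous_anomalies
-- ===== SOURCE A (Python) =====
-- def detect_continuous_anomalies(colors, window_size=5, min_count=3):
--     anomaly_indices = []
--     for i in range(len(colors) - window_size + 1):
--         window = colors[i:i + window_size]
--         count = sum([1 for color in window if color in ['purple', 'red']])
--         if count >= min_count:
--             anomaly_indices.append(i + window_size - 1)
--     return anomaly_indices
-- ===== SOURCE B (Python) =====
-- def detect_continuous_anomalies(colors, window_size=5, min_count=3):
--     # Prefix-sum of anomaly colors, then each window count is one subtraction: O(n) instead of O(n*w).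
--     prefix = [0]
--     for color in colors:
--         prefix.append(prefix[-1] + (color in ('purple', 'red')))
--     return [i + window_size - 1
--             for i in range(len(colors) - window_size + 1)
--             if prefix[i + window_size] - prefix[i] >= min_count]
-- ===== Notes on version B (the rewrite author's own statement) =====
-- stated objective: faster
-- what changed: Replaced the per-index window slice and rescan by a one-pass prefix-sum of anomaly counts, so each window test is a single subtraction.
-- outside the precondition, e.g. on detect_continuous_anomalies(['red', 'red', 'blue'], -1, 1): A returns [-2], B raises IndexError
import Mathlib
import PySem

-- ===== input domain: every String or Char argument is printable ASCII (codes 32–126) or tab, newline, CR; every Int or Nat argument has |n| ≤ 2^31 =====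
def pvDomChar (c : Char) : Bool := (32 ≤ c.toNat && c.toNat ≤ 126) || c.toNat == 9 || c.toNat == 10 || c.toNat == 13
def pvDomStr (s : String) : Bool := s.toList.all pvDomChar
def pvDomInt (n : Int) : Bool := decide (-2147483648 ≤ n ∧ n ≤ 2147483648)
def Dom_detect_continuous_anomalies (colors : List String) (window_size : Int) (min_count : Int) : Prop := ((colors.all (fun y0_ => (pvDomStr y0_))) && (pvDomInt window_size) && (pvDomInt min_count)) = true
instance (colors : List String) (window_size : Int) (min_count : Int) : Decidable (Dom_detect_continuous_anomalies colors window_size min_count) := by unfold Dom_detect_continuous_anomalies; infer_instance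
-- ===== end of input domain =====

-- B replaces the per-window rescan by a prefix-sum of anomaly counts, so each
-- window test is one subtraction (objective: faster, O(n) instead of O(n*w)).

-- ===== PORT A =====
-- 'color in ['purple', 'red']'
def pvIsAnom (c : String) : Bool := c == "purple" || c == "red"

def detect_continuous_anomalies (colors : List String) (window_size : Int) (min_count : Int) : List Int :=
  (PySem.List.pyRange 0 ((colors.length : Int) - window_size + 1) 1).foldl
    (fun acc i =>
      let window := PySem.List.slice colors (some i) (some (i + window_size))
      let count : Int := ((window.filter (fun c => pvIsAnom c)).map (fun _ => (1 : Int))).sum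
      if count ≥ min_count then acc ++ [i + window_size - 1] else acc) []

-- ===== PORT B =====
def detect_continuous_anomalies_alt (colors : List String) (window_size : Int) (min_count : Int) : List Int :=
  let pre := colors.foldl
    (fun acc c => acc ++ [PySem.List.pyGetD acc (-1) 0 + (if pvIsAnom c then (1 : Int) else 0)])
    [(0 : Int)]
  ((PySem.List.pyRange 0 ((colors.length : Int) - window_size + 1) 1).filter
    (fun i => decide (PySem.List.pyGetD pre (i + window_size) 0 - PySem.List.pyGetD pre i 0 ≥ min_count))).map
    (fun i => i + window_size - 1)

-- ===== PRECONDITION & SPEC =====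
-- Pre_ excludes negative window_size: there A's value is an accident of Python's
-- negative-slice/index wraparound (e.g. windows like colors[0:-1] and result indices
-- below -1), while B's prefix-sum indexing naturally raises IndexError.
def Pre_detect_continuous_anomalies (colors : List String) (window_size : Int) (min_count : Int) : Prop :=
  0 ≤ window_size
instance (colors : List String) (window_size : Int) (min_count : Int) : Decidable (Pre_detect_continuous_anomalies colors window_size min_count) := by unfold Pre_detect_continuous_anomalies; infer_instance
def pvWitness_detect_continuous_anomalies : List String × Int × Int := (["red", "purple", "blue"], 2, 1)

def Spec_detect_continuous_anomalies (colors : List String) (window_size : Int) (min_count : Int) (out : List Int) : Prop := out = detect_continuous_anomalies_alt colors window_size min_count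
instance (colors : List String) (window_size : Int) (min_count : Int) (out : List Int) : Decidable (Spec_detect_continuous_anomalies colors window_size min_count out) := by unfold Spec_detect_continuous_anomalies; infer_instance

-- ===== CLAIM (what is proved, stated in full; the proofs are below) =====
def Claim_equal_detect_continuous_anomalies : Prop := ∀ (colors : List String) (window_size : Int) (min_count : Int), Dom_detect_continuous_anomalies colors window_size min_count → Pre_detect_continuous_anomalies colors window_size min_count → Spec_detect_continuous_anomalies colors window_size min_count (detect_continuous_anomalies colors window_size min_count)

-- ===== LEMMAS AND PROOFS =====

-- running-sum list produced by B's prefix loop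
def pvScan (s : Int) : List String → List Int
  | [] => []
  | c :: cs => (s + (if pvIsAnom c then 1 else 0)) :: pvScan (s + (if pvIsAnom c then 1 else 0)) cs

-- the number of anomaly colors in the first k elements, as an Int
def pvCnt (colors : List String) (k : Nat) : Int :=
  (((colors.take k).filter (fun c => pvIsAnom c)).length : Int)

theorem pvScan_foldl (cs : List String) :
    ∀ (acc : List Int) (x : Int),
      cs.foldl (fun acc c => acc ++ [PySem.List.pyGetD acc (-1) 0 + (if pvIsAnom c then (1 : Int) else 0)]) (acc ++ [x])
        = acc ++ [x] ++ pvScan x cs := by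
  induction cs with
  | nil => intro acc x; simp [pvScan]
  | cons c cs ih =>
    intro acc x
    simp only [List.foldl_cons, PySem.List.pyGetD_neg_one_append_singleton, pvScan]
    have := ih (acc ++ [x]) (x + (if pvIsAnom c then 1 else 0))
    simpa using this

theorem pvScan_getD (cs : List String) :
    ∀ (s : Int) (k : Nat), k ≤ cs.length →
      (s :: pvScan s cs).getD k 0 = s + (((cs.take k).filter (fun c => pvIsAnom c)).length : Int) := by
  induction cs with
  | nil =>
    intro s k hk
    have hk0 : k = 0 := Nat.le_zero.mp hk
    subst hk0
    simp [pvScan]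
  | cons c cs ih =>
    intro s k hk
    cases k with
    | zero => simp
    | succ k =>
      simp only [pvScan, List.getD_cons_succ, List.take_succ_cons, List.filter_cons]
      have hk' : k ≤ cs.length := by simpa using hk
      have := ih (s + (if pvIsAnom c then 1 else 0)) k hk'
      by_cases h : pvIsAnom c = true <;> simp [h] at this ⊢ <;> omega

theorem pv_sum_ones (l : List String) : (l.map (fun _ => (1 : Int))).sum = (l.length : Int) := by
  induction l with
  | nil => simp
  | cons a l ih => simp [ih]; omega

-- the window count of A equals the difference of prefix counts
theorem pv_window_count (colors : List String) (k j : Nat) :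
    (((PySem.List.slice colors (some (k : Int)) (some ((k : Int) + (j : Int)))).filter (fun c => pvIsAnom c)).length : Int)
      = pvCnt colors (k + j) - pvCnt colors k := by
  have hcast : (k : Int) + (j : Int) = ((k + j : Nat) : Int) := by push_cast; ring
  rw [hcast, PySem.List.slice_natCast]
  unfold pvCnt
  have htake : colors.take (k + j) = colors.take k ++ (colors.drop k).take j := by
    rw [List.take_add]
  rw [htake, List.filter_append, List.length_append]
  have : (k + j) - k = j := by omega
  rw [this]
  push_cast
  ring

-- ===== VERDICT (by name: the statement is the Claim_ definition above) =====
theorem detect_continuous_anomalies_spec : Claim_equal_detect_continuous_anomalies := by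
  intro colors w m _dom hw
  unfold Spec_detect_continuous_anomalies
  unfold Pre_detect_continuous_anomalies at hw
  simp only [detect_continuous_anomalies, detect_continuous_anomalies_alt]
  have hpre : colors.foldl
      (fun acc c => acc ++ [PySem.List.pyGetD acc (-1) 0 + (if pvIsAnom c then (1 : Int) else 0)])
      [(0 : Int)] = (0 : Int) :: pvScan 0 colors := by
    have := pvScan_foldl colors [] 0
    simpa using this
  rw [hpre]
  rw [PySem.List.foldl_append_ite (p := fun i => (((PySem.List.slice colors (some i) (some (i + w))).filter (fun c => pvIsAnom c)).map (fun _ => (1 : Int))).sum ≥ m) (f := fun i => i + w - 1)]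
  rw [List.nil_append]
  congr 1
  apply List.filter_congr
  intro i hi
  rw [PySem.List.mem_pyRange_one] at hi
  obtain ⟨hi0, hilt⟩ := hi
  obtain ⟨k, rfl⟩ : ∃ k : Nat, i = (k : Int) := ⟨i.toNat, by omega⟩
  obtain ⟨j, rfl⟩ : ∃ j : Nat, w = (j : Int) := ⟨w.toNat, by omega⟩
  have hkjn : k + j ≤ colors.length := by omega
  have hiw : (k : Int) + (j : Int) = ((k + j : Nat) : Int) := by push_cast; ring
  rw [pv_sum_ones, pv_window_count colors k j, hiw,
      PySem.List.pyGetD_natCast, PySem.List.pyGetD_natCast,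
      pvScan_getD colors 0 (k + j) hkjn, pvScan_getD colors 0 k (by omega)]
  simp [pvCnt]
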